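-- pv_equiv track=rewrite | github.com/carmelyr/nn_standard_architecture_hps | pareto_analysis.py | _calculate_lstm_size
-- ===== SOURCE A (Python) =====
-- def _calculate_lstm_size(config, input_shape, num_classes):
--     hidden_units = config["hidden_units"]
--     num_layers = config["num_layers"]
--     bidirectional = config.get("bidirectional", False)
--
--     seq_len, num_features = input_shape
--     directions = 2 if bidirectional else 1
--
--     total_params = 0
--
--     # LSTM parameters: 4 gates * (input_size + hidden_size + 1) * hidden_size
--     for layer in range(num_layers):
--         input_size = num_features if layer == 0 else hidden_units * directions
--
--         # input to hidden weights (4 gates)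
--         total_params += 4 * input_size * hidden_units
--         # hidden to hidden weights (4 gates)
--         total_params += 4 * hidden_units * hidden_units
--         # biases (4 gates)
--         total_params += 4 * hidden_units
--
--         # if bidirectional, doubles the parameters for backward direction
--         if bidirectional:
--             total_params += 4 * input_size * hidden_units
--             total_params += 4 * hidden_units * hidden_units
--             total_params += 4 * hidden_units
--
--     # classifier layers
--     classifier_input = hidden_units * directions
--     # first linear layer
--     total_params += classifier_input * (hidden_units * 2) + (hidden_units * 2)
--     # second linear layer
--     total_params += (hidden_units * 2) * num_classes + num_classes
--
--     return total_params
-- ===== SOURCE B (Python) =====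
-- def _calculate_lstm_size(config, input_shape, num_classes):
--     h = config["hidden_units"]
--     n = config["num_layers"]
--     d = 2 if config.get("bidirectional", False) else 1
--     _, f = input_shape
--     per = 4 * h * (h + 1)                       # hidden-hidden weights + biases, one direction
--     p_first = d * (4 * f * h + per)             # layer 0 cost (all directions)
--     p_rest = d * (4 * (h * d) * h + per)        # cost of each later layer (all directions)
--     lstm = p_first + max(0, n - 1) * p_rest if n > 0 else 0
--     return lstm + (h * d) * (2 * h) + 2 * h + (2 * h) * num_classes + num_classes
-- ===== Notes on version B (the rewrite author's own statement) =====
-- stated objective: simpler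
-- what changed: Replaces the per-layer accumulation loop (with a duplicated bidirectional block) by a closed-form expression: first-layer cost plus max(0, num_layers-1) copies of the constant later-layer cost, each scaled once by the direction count.
import Mathlib
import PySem

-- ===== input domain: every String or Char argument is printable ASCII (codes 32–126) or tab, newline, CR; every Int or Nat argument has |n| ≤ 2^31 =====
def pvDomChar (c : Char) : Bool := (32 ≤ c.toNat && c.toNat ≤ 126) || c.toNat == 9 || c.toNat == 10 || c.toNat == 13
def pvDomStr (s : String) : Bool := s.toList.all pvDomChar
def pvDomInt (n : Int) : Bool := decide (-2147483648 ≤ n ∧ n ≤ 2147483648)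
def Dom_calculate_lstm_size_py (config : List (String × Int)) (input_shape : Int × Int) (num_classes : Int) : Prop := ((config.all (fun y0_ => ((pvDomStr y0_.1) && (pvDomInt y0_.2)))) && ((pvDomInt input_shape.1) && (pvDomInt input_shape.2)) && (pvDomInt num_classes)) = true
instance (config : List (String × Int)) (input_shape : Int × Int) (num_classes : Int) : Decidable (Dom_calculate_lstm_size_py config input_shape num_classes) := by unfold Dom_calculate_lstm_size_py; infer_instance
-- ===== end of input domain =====

-- B replaces A's per-layer loop by a closed-form count: first-layer cost + max(0, num_layers-1) copies
-- of the constant later-layer cost (objective: simpler; return value only, no side effects involved).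

-- ===== PORT A =====
-- literal transliteration of A: loop over range(num_layers), accumulating per-layer params
def calculate_lstm_size_py (config : List (String × Int)) (input_shape : Int × Int) (num_classes : Int) : Int :=
  match List.lookup "hidden_units" config, List.lookup "num_layers" config with
  | some hidden_units, some num_layers =>
    let bidirectional : Int := (List.lookup "bidirectional" config).getD 0
    let num_features := input_shape.2
    let directions : Int := if bidirectional ≠ 0 then 2 else 1
    let total_params : Int :=
      (PySem.List.pyRange 0 num_layers 1).foldl (fun total_params layer =>
        let input_size := if layer = 0 then num_features else hidden_units * directions
        let t := total_params + 4 * input_size * hidden_units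
                 + 4 * hidden_units * hidden_units + 4 * hidden_units
        if bidirectional ≠ 0 then
          t + 4 * input_size * hidden_units + 4 * hidden_units * hidden_units + 4 * hidden_units
        else t) 0
    let classifier_input := hidden_units * directions
    let total_params := total_params + classifier_input * (hidden_units * 2) + (hidden_units * 2)
    let total_params := total_params + (hidden_units * 2) * num_classes + num_classes
    total_params
  | _, _ => 0  -- KeyError in Python; excluded by Pre_

-- ===== PORT B =====
-- literal transliteration of Source B: closed form, no loop
def calculate_lstm_size_py_alt (config : List (String × Int)) (input_shape : Int × Int) (num_classes : Int) : Int :=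
  match List.lookup "hidden_units" config with
  | none => 0  -- KeyError in Python; excluded by Pre_
  | some h =>
  match List.lookup "num_layers" config with
  | none => 0  -- KeyError in Python; excluded by Pre_
  | some n =>
    let d : Int := if (List.lookup "bidirectional" config).getD 0 ≠ 0 then 2 else 1
    let f := input_shape.2
    let per := 4 * h * (h + 1)
    let pFirst := d * (4 * f * h + per)
    let pRest := d * (4 * (h * d) * h + per)
    let lstm : Int := if 0 < n then pFirst + max 0 (n - 1) * pRest else 0
    lstm + (h * d) * (2 * h) + 2 * h + (2 * h) * num_classes + num_classes

-- ===== PRECONDITION & SPEC =====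
-- Pre_ excludes exactly the inputs on which A raises KeyError (missing "hidden_units" or "num_layers")
def Pre_calculate_lstm_size_py (config : List (String × Int)) (input_shape : Int × Int) (num_classes : Int) : Prop :=
  (List.lookup "hidden_units" config).isSome ∧ (List.lookup "num_layers" config).isSome
instance (config : List (String × Int)) (input_shape : Int × Int) (num_classes : Int) : Decidable (Pre_calculate_lstm_size_py config input_shape num_classes) := by unfold Pre_calculate_lstm_size_py; infer_instance

def pvWitness_calculate_lstm_size_py : (List (String × Int)) × (Int × Int) × Int :=
  ([("hidden_units", 3), ("num_layers", 2), ("bidirectional", 1)], (5, 4), 7)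

def Spec_calculate_lstm_size_py (config : List (String × Int)) (input_shape : Int × Int) (num_classes : Int) (out : Int) : Prop := out = calculate_lstm_size_py_alt config input_shape num_classes
instance (config : List (String × Int)) (input_shape : Int × Int) (num_classes : Int) (out : Int) : Decidable (Spec_calculate_lstm_size_py config input_shape num_classes out) := by unfold Spec_calculate_lstm_size_py; infer_instance

-- ===== CLAIM (what is proved, stated in full; the proofs are below) =====
def Claim_equal_calculate_lstm_size_py : Prop := ∀ (config : List (String × Int)) (input_shape : Int × Int) (num_classes : Int), Dom_calculate_lstm_size_py config input_shape num_classes → Pre_calculate_lstm_size_py config input_shape num_classes → Spec_calculate_lstm_size_py config input_shape num_classes (calculate_lstm_size_py config input_shape num_classes)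

-- ===== LEMMAS AND PROOFS =====

-- A's loop, summed up: the layer-0 body value plus (n-1) copies of the later-layer body value.
theorem pv_loop_sum (g : Int → Int) (n : Int) (hg : ∀ x : Int, 1 ≤ x → g x = g 1) :
    (PySem.List.pyRange 0 n 1).foldl (fun acc layer => acc + g layer) 0
      = if 0 < n then g 0 + max 0 (n - 1) * g 1 else 0 := by
  rw [PySem.List.foldl_add]
  by_cases hn : 0 < n
  · rw [PySem.List.pyRange_one_cons hn]
    have hmap : (PySem.List.pyRange (0+1) n 1).map g = (PySem.List.pyRange (0+1) n 1).map (fun _ => g 1) := by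
      apply List.map_congr_left
      intro x hx
      exact hg x (by have := (PySem.List.mem_pyRange_one.mp hx).1; omega)
    rw [List.map_cons, List.sum_cons, hmap, if_pos hn]
    simp only [List.map_const', List.sum_replicate, PySem.List.length_pyRange_one]
    rw [nsmul_eq_mul]
    have : (((n - (0 + 1)).toNat : Int)) = max 0 (n - 1) := by omega
    rw [this]; ring
  · rw [PySem.List.pyRange_one_eq_nil (by omega), if_neg hn]
    simp

theorem calculate_lstm_size_py_spec : Claim_equal_calculate_lstm_size_py := by
  intro config input_shape num_classes _hdom hpre
  unfold Spec_calculate_lstm_size_py calculate_lstm_size_py calculate_lstm_size_py_alt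
  obtain ⟨h1, h2⟩ := hpre
  obtain ⟨h, hh⟩ := Option.isSome_iff_exists.mp h1
  obtain ⟨n, hn⟩ := Option.isSome_iff_exists.mp h2
  rw [hh, hn]
  simp only
  set bid : Int := (List.lookup "bidirectional" config).getD 0 with hbid
  set d : Int := if bid ≠ 0 then 2 else 1 with hd
  set f : Int := input_shape.2 with hf
  have hbody : (fun (total : Int) (layer : Int) =>
        let input_size := if layer = 0 then f else h * d
        let t := total + 4 * input_size * h + 4 * h * h + 4 * h
        if bid ≠ 0 then t + 4 * input_size * h + 4 * h * h + 4 * h else t)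
      = fun (total : Int) (layer : Int) => total +
        (let input_size := if layer = 0 then f else h * d
         let s := 4 * input_size * h + 4 * h * h + 4 * h
         if bid ≠ 0 then s + s else s) := by
    funext total layer
    simp only
    split <;> ring
  rw [hbody, pv_loop_sum _ n (by
    intro x hx
    simp only [if_neg (show x ≠ 0 by omega), if_neg (show (1 : Int) ≠ 0 by norm_num)])]
  simp only [if_neg (show (1 : Int) ≠ 0 by norm_num), hd]
  split_ifs <;> ring
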